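-- pv_equiv track=rewrite | github.com/vijayroykargwal/Infy-FP | PF/Day7/src/Assign47.py | encrypt_sentence
-- ===== SOURCE A (Python) =====
-- def encrypt_sentence(sentence):
--  vowel_set = set("aeiouAEIOU")
--  new_list=[]
--  new_str=""
--  sentence = sentence.split(" ")
--
--  for i in range(0,len(sentence)):
--      if(i%2==0):
--          sentence[i]= sentence[i][::-1]
--          new_list.append(sentence[i])
--      else:
--          vowels=list()
--          consonants=list()
--          for letter in sentence[i]:
--              if letter in vowel_set:
--                  vowels.append(letter)
--              else:
--                  consonants.append(letter)
--          new_string = "".join(consonants) + "".join(vowels)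
--          new_list.append(new_string)
--  for i in range(0,len(new_list)):
--      if(i==0):
--          new_str= new_str+ new_list[i]
--      else:
--          new_str = new_str+" "+new_list[i]
--
--
--
--
--
--  return new_str
-- ===== SOURCE B (Python) =====
-- def encrypt_sentence(sentence):
--     vowels = set("aeiouAEIOU")
--     return " ".join(
--         w[::-1] if i % 2 == 0 else "".join(sorted(w, key=lambda c: c in vowels))
--         for i, w in enumerate(sentence.split(" "))
--     )
-- ===== Notes on version B (the rewrite author's own statement) =====
-- stated objective: idiomatic
-- what changed: Replaces A's manual vowel/consonant partition and its two index loops (build a list, then concatenate by hand) with a single space-join over a generator that reverses even-indexed words and stably sorts odd-indexed words by a vowel-membership key.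
import Mathlib
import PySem

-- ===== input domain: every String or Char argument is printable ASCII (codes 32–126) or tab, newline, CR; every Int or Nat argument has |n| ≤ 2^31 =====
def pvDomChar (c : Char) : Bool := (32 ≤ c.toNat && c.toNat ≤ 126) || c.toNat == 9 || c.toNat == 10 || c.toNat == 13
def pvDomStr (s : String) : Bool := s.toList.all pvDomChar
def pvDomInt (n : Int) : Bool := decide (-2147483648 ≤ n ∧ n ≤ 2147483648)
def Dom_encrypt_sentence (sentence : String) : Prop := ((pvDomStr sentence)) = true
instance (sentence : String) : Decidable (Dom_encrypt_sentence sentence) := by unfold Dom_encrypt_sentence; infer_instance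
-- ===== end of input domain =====

-- B replaces A's manual vowel/consonant partition and its two index loops with a single
-- space-join over enumerate(split), sorting odd words stably by a vowel-membership key
-- (idiomatic; same observable behaviour; A only mutates its own local list).

-- ===== PORT A =====
def encrypt_sentence (sentence : String) : String :=
  let vowel_set : PySem.Set Char := PySem.Set.ofList "aeiouAEIOU".toList
  let words := PySem.Chars.splitOn sentence.toList [' ']
  -- first loop: for i in range(0, len(sentence)): build new_list
  let new_list := (PySem.List.pyRange 0 (PySem.List.len words)).foldl
    (fun (acc : List (List Char)) i =>
      let w := PySem.List.pyGetD words i []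
      if PySem.Int.mod i 2 == 0 then
        acc ++ [(PySem.List.slice? w none none (-1)).getD []]  -- sentence[i][::-1]
      else
        -- inner loop: partition letters into vowels / consonants
        let vc := w.foldl
          (fun (p : List Char × List Char) letter =>
            if vowel_set.contains letter then (p.1 ++ [letter], p.2)
            else (p.1, p.2 ++ [letter]))
          ([], [])
        acc ++ [vc.2 ++ vc.1])  -- "".join(consonants) + "".join(vowels)
    []
  -- second loop: for i in range(0, len(new_list)): concatenate with spaces
  let new_str := (PySem.List.pyRange 0 (PySem.List.len new_list)).foldl
    (fun (acc : List Char) i =>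
      if i == 0 then acc ++ PySem.List.pyGetD new_list i []
      else acc ++ [' '] ++ PySem.List.pyGetD new_list i [])
    []
  String.ofList new_str

-- ===== PORT B =====
def encrypt_sentence_alt (sentence : String) : String :=
  let vowels : PySem.Set Char := PySem.Set.ofList "aeiouAEIOU".toList
  String.ofList (PySem.Chars.join [' ']
    ((PySem.List.enumerate (PySem.Chars.splitOn sentence.toList [' '])).map
      (fun p =>
        if PySem.Int.mod p.1 2 == 0 then
          (PySem.List.slice? p.2 none none (-1)).getD []          -- w[::-1]
        else
          PySem.List.sorted p.2 (fun c => vowels.contains c))))   -- stable sort, consonants (key false) first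

-- ===== PRECONDITION & SPEC =====
def Spec_encrypt_sentence (sentence : String) (out : String) : Prop := out = encrypt_sentence_alt sentence
instance (sentence : String) (out : String) : Decidable (Spec_encrypt_sentence sentence out) := by unfold Spec_encrypt_sentence; infer_instance

-- ===== CLAIM (what is proved, stated in full; the proofs are below) =====
def Claim_equal_encrypt_sentence : Prop := ∀ (sentence : String), Dom_encrypt_sentence sentence → Spec_encrypt_sentence sentence (encrypt_sentence sentence)

-- ===== LEMMAS AND PROOFS =====

-- Inserting an element with key = true goes to the very end (nothing is "after" a true key).
theorem pv_insertBy_true {α : Type} (key : α → Bool) (x : α) (l : List α)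
    (hx : key x = true) :
    PySem.List.insertBy (fun a b => decide (key a < key b)) x l = l ++ [x] := by
  apply PySem.List.insertBy_of_forall_not_before
  intro y _
  simp only [hx]
  cases key y <;> decide

-- Inserting an element with key = false into (all-false ++ all-true) lands between them.
theorem pv_insertBy_false {α : Type} (key : α → Bool) (x : α) (F T : List α)
    (hx : key x = false) (hF : ∀ c ∈ F, key c = false) (hT : ∀ c ∈ T, key c = true) :
    PySem.List.insertBy (fun a b => decide (key a < key b)) x (F ++ T) = F ++ x :: T := by
  induction F with
  | nil =>
    cases T with
    | nil => simp [PySem.List.insertBy]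
    | cons t T' =>
      have ht : key t = true := hT t (by simp)
      simp [PySem.List.insertBy, hx, ht]
  | cons f F' ih =>
    have hf : key f = false := hF f (by simp)
    have : decide (key x < key f) = false := by rw [hx, hf]; decide
    simp only [List.cons_append, PySem.List.insertBy, this, Bool.false_eq_true, if_false]
    rw [ih (fun c hc => hF c (by simp [hc]))]

-- Stable sort by a Bool key = (key-false elements) ++ (key-true elements), in order.
theorem pv_sorted_bool {α : Type} (key : α → Bool) (w : List α) :
    PySem.List.sorted w key = w.filter (fun c => !key c) ++ w.filter key := by
  have aux : ∀ (u : List α) (F T : List α),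
      (∀ c ∈ F, key c = false) → (∀ c ∈ T, key c = true) →
      u.foldl (fun acc x => PySem.List.insertBy (fun a b => decide (key a < key b)) x acc) (F ++ T)
        = (F ++ u.filter (fun c => !key c)) ++ (T ++ u.filter key) := by
    intro u
    induction u with
    | nil => intro F T _ _; simp
    | cons x u' ih =>
      intro F T hF hT
      by_cases hx : key x = true
      · rw [List.foldl_cons, pv_insertBy_true key x (F ++ T) hx]
        rw [List.append_assoc]
        rw [ih F (T ++ [x]) hF (by intro c hc; rcases List.mem_append.1 hc with h | h
                                   · exact hT c h
                                   · simp at h; simpa [h])]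
        simp [hx]
      · have hx' : key x = false := by revert hx; cases key x <;> simp
        rw [List.foldl_cons, pv_insertBy_false key x F T hx' hF hT]
        have : F ++ x :: T = (F ++ [x]) ++ T := by simp
        rw [this, ih (F ++ [x]) T (by intro c hc; rcases List.mem_append.1 hc with h | h
                                      · exact hF c h
                                      · simp at h; simpa [h]) hT]
        simp [hx']
  have h0 := aux w [] [] (by simp) (by simp)
  simpa [PySem.List.sorted_eq_foldl_insertBy] using h0
-- A's inner partition loop computes (vowels-so-far, consonants-so-far) as filters.
theorem pv_partition_foldl {α : Type} (P : α → Bool) (w : List α) (v c : List α) :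
    w.foldl (fun (p : List α × List α) letter =>
        if P letter then (p.1 ++ [letter], p.2) else (p.1, p.2 ++ [letter])) (v, c)
      = (v ++ w.filter P, c ++ w.filter (fun l => !P l)) := by
  induction w generalizing v c with
  | nil => simp
  | cons x w' ih =>
    by_cases hx : P x = true
    · simp [List.foldl_cons, hx, ih]
    · have hx' : P x = false := by revert hx; cases P x <;> simp
      simp [List.foldl_cons, hx', ih]

-- join with spaces = head ++ flatMap (' ' :: ·) tail
theorem pv_join_space (a : List Char) (rest : List (List Char)) :
    PySem.Chars.join [' '] (a :: rest) = a ++ rest.flatMap (fun w => ' ' :: w) := by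
  induction rest generalizing a with
  | nil => simp [PySem.Chars.join_singleton]
  | cons b rest' ih =>
    rw [PySem.Chars.join_cons_cons, ih b]
    simp

-- A's second loop computes exactly ' '.join
theorem pv_join_loop (l : List (List Char)) :
    (PySem.List.pyRange 0 (PySem.List.len l)).foldl
      (fun (acc : List Char) i =>
        if i == 0 then acc ++ PySem.List.pyGetD l i []
        else acc ++ [' '] ++ PySem.List.pyGetD l i []) []
      = PySem.Chars.join [' '] l := by
  cases l with
  | nil => simp [PySem.List.pyRange_one_eq_nil, PySem.Chars.join_nil, PySem.List.len]
  | cons a rest =>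
    have hlen : PySem.List.len (a :: rest) = (rest.length : Int) + 1 := by
      simp [PySem.List.len]
    have hsplit : PySem.List.pyRange 0 (PySem.List.len (a :: rest))
        = PySem.List.pyRange 0 1 ++ PySem.List.pyRange 1 (PySem.List.len (a :: rest)) := by
      apply PySem.List.pyRange_one_append 0 1 _ (by omega) (by rw [hlen]; omega)
    rw [hsplit, List.foldl_append]
    have h01 : PySem.List.pyRange 0 1 = [0] := by decide
    rw [h01]
    have hstep0 : List.foldl
        (fun (acc : List Char) i =>
          if i == 0 then acc ++ PySem.List.pyGetD (a :: rest) i []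
          else acc ++ [' '] ++ PySem.List.pyGetD (a :: rest) i []) [] [0] = a := by
      simp [PySem.List.pyGetD, PySem.List.pyGet?, PySem.List.pyIdx?]
    rw [hstep0]
    have hcongr : List.foldl
        (fun (acc : List Char) i =>
          if i == 0 then acc ++ PySem.List.pyGetD (a :: rest) i []
          else acc ++ [' '] ++ PySem.List.pyGetD (a :: rest) i []) a
        (PySem.List.pyRange 1 (PySem.List.len (a :: rest)))
        = List.foldl
        (fun (acc : List Char) i => acc ++ (' ' :: PySem.List.pyGetD (a :: rest) i [])) a
        (PySem.List.pyRange 1 (PySem.List.len (a :: rest))) := by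
      apply PySem.List.foldl_congr_mem
      intro acc x hx
      have hx1 : (1 : Int) ≤ x := (PySem.List.mem_pyRange_one.1 hx).1
      have : (x == 0) = false := by simp; omega
      simp [this]
    rw [hcongr]
    rw [PySem.List.foldl_pyRange_pyGetD (a :: rest) []
      (fun acc w => acc ++ (' ' :: w)) a (by omega)]
    simp only [Int.toNat_one, List.drop_succ_cons, List.drop_zero]
    rw [PySem.List.foldl_append_eq_flatMap (fun w => ' ' :: w) rest a]
    exact (pv_join_space a rest).symm

-- An index loop appending one of two values per step is a map over the range.
theorem pv_foldl_if_singleton {β : Type} (c : Int → Bool) (u v : Int → β)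
    (l : List Int) (acc : List β) :
    l.foldl (fun acc i => if c i then acc ++ [u i] else acc ++ [v i]) acc
      = acc ++ l.map (fun i => if c i then u i else v i) := by
  have h : (fun (acc : List β) i => if c i then acc ++ [u i] else acc ++ [v i])
      = fun acc i => acc ++ [if c i then u i else v i] := by
    funext acc i; split <;> rfl
  rw [h, PySem.List.foldl_append_singleton_eq_map]

-- ===== VERDICT (by name: the statement is the Claim_ definition above) =====
theorem encrypt_sentence_spec : Claim_equal_encrypt_sentence := by
  intro sentence _
  unfold Spec_encrypt_sentence encrypt_sentence encrypt_sentence_alt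
  simp only []
  set vowel_set : PySem.Set Char := PySem.Set.ofList "aeiouAEIOU".toList with hv
  set words := PySem.Chars.splitOn sentence.toList [' '] with hw
  rw [pv_join_loop]
  congr 1
  -- A's first loop is a map over the index range; B's map over enumerate is the same map
  rw [pv_foldl_if_singleton (fun i => PySem.Int.mod i 2 == 0)
    (fun i => (PySem.List.slice? (PySem.List.pyGetD words i []) none none (-1)).getD [])
    (fun i =>
      ((PySem.List.pyGetD words i []).foldl
          (fun (p : List Char × List Char) letter =>
            if vowel_set.contains letter then (p.1 ++ [letter], p.2)
            else (p.1, p.2 ++ [letter])) ([], [])).2 ++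
      ((PySem.List.pyGetD words i []).foldl
          (fun (p : List Char × List Char) letter =>
            if vowel_set.contains letter then (p.1 ++ [letter], p.2)
            else (p.1, p.2 ++ [letter])) ([], [])).1)]
  rw [PySem.List.enumerate_eq_map_pyRange words []]
  simp only [List.nil_append, List.map_map]
  congr 1
  apply List.map_congr_left
  intro j _
  by_cases hj : (PySem.Int.mod j 2 == 0) = true
  · simp only [Function.comp]
    rw [if_pos hj, if_pos hj]
  · simp only [Function.comp]
    simp only [hj, if_false, Bool.false_eq_true]
    rw [pv_partition_foldl (fun letter => vowel_set.contains letter) (PySem.List.pyGetD words j []) [] []]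
    rw [pv_sorted_bool (fun c => vowel_set.contains c) (PySem.List.pyGetD words j [])]
    simp
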